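-- pv_equiv track=rewrite | github.com/Hadrien-Cornier/Culture-Calendar | scripts/build_llms_txt.py | _collect_venues
-- ===== SOURCE A (Python) =====
-- from collections import Counter
-- from typing import Iterable, Optional, Sequence
--
-- def _collect_venues(events: Sequence[dict]) -> list[tuple[str, int]]:
--     counter: Counter[str] = Counter()
--     for e in events:
--         if isinstance(e, dict):
--             venue = e.get("venue")
--             if venue:
--                 counter[str(venue)] += 1
--     return sorted(counter.items())
-- ===== SOURCE B (Python) =====
-- from itertools import groupby
-- from typing import Sequence
--
--
-- def _collect_venues(events: Sequence[dict]) -> list[tuple[str, int]]: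
--     vs = sorted(str(v) for e in events
--                 if isinstance(e, dict) and (v := e.get("venue")))
--     return [(k, sum(1 for _ in g)) for k, g in groupby(vs)]
-- ===== Notes on version B (the rewrite author's own statement) =====
-- stated objective: alternative
-- what changed: Replaces the hash-based Counter with a sort-then-group pass: collect the venue strings, sort them, and run-length count consecutive runs with itertools.groupby, yielding the same sorted (venue, count) list.
import Mathlib
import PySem

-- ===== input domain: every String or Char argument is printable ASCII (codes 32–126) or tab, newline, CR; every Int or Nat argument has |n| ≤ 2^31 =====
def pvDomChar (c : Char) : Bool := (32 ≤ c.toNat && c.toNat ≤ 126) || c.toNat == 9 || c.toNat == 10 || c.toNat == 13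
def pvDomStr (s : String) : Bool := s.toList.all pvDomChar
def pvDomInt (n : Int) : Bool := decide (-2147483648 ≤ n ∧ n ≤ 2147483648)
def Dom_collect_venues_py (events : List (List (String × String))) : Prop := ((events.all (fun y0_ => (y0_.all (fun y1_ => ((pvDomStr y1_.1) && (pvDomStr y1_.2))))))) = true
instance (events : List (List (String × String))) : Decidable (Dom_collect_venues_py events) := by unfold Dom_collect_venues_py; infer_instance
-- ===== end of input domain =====

-- B replaces A's hash-based Counter by a sort-then-group run-length count (same sorted (venue, count) result); objective: alternative.
-- In the Lean model every event is a dict (association list), so A's `isinstance(e, dict)` test is always true and is dropped;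
-- values are strings, so `str(venue)` is the identity and truthiness of `venue` is "nonempty string".

-- ===== PORT A =====
def collect_venues_py (events : List (List (String × String))) : List (String × Int) :=
  let counter : PySem.Dict String Int :=
    events.foldl (fun c e =>
      match PySem.Dict.get? (PySem.Dict.mk e) "venue" with
      | some venue => if venue ≠ "" then c.modify venue 0 (· + 1) else c
      | none => c) PySem.Dict.empty
  PySem.List.sorted2 counter.items Prod.fst Prod.snd

-- ===== PORT B =====
-- the filtered venue list: str(v) for e in events if e.get("venue") is truthy
def pvVenues (events : List (List (String × String))) : List String :=
  events.filterMap (fun e =>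
    match PySem.Dict.get? (PySem.Dict.mk e) "venue" with
    | some v => if v ≠ "" then some v else none
    | none => none)

-- itertools.groupby with run counting, ported by hand (exact: consecutive equal runs with their lengths)
def pvRunsAux : List String → String → Int → List (String × Int)
  | [], cur, c => [(cur, c)]
  | x :: t, cur, c => if x = cur then pvRunsAux t cur (c + 1) else (cur, c) :: pvRunsAux t x 1

def pvRle : List String → List (String × Int)
  | [] => []
  | x :: t => pvRunsAux t x 1

def collect_venues_py_alt (events : List (List (String × String))) : List (String × Int) :=
  pvRle (PySem.List.sorted (pvVenues events) (fun v => v))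

-- ===== PRECONDITION & SPEC =====
def Spec_collect_venues_py (events : List (List (String × String))) (out : List (String × Int)) : Prop := out = collect_venues_py_alt events
instance (events : List (List (String × String))) (out : List (String × Int)) : Decidable (Spec_collect_venues_py events out) := by unfold Spec_collect_venues_py; infer_instance

-- ===== CLAIM (what is proved, stated in full; the proofs are below) =====
def Claim_equal_collect_venues_py : Prop := ∀ (events : List (List (String × String))), Dom_collect_venues_py events → Spec_collect_venues_py events (collect_venues_py events)

-- ===== LEMMAS AND PROOFS =====

-- the lexicographic strict "before" test sorted2 uses on (String × Int) pairs
def pvLexLt (a b : String × Int) : Bool :=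
  decide (a.1 < b.1) || (!decide (b.1 < a.1) && decide (a.2 < b.2))

-- A's event loop is the Counter of the filtered venue list
lemma pvFoldA_eq (events : List (List (String × String))) (c : PySem.Dict String Int) :
    events.foldl (fun c e =>
      match PySem.Dict.get? (PySem.Dict.mk e) "venue" with
      | some venue => if venue ≠ "" then c.modify venue 0 (· + 1) else c
      | none => c) c
    = (pvVenues events).foldl (fun d x => d.modify x 0 (· + 1)) c := by
  induction events generalizing c with
  | nil => rfl
  | cons e es ih =>
      cases h : PySem.Dict.get? (PySem.Dict.mk e) "venue" with
      | none =>
          have := ih c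
          simp [pvVenues, h] at this ⊢
          exact this
      | some v =>
          by_cases hv : v = ""
          · have := ih c
            simp [pvVenues, h, hv] at this ⊢
            exact this
          · have := ih (c.modify v 0 (· + 1))
            simp [pvVenues, h, hv] at this ⊢
            exact this

lemma pvLexLt_asymm {a b : String × Int} (h : pvLexLt a b = true) : pvLexLt b a = false := by
  simp [pvLexLt] at h ⊢
  rcases h with h | ⟨h1, h2⟩
  · exact ⟨le_of_lt h, fun h' => absurd h (not_lt.mpr h')⟩
  · exact ⟨h1, fun _ => le_of_lt h2⟩

lemma pvLexLt_trans {a b c : String × Int} (h1 : pvLexLt a b = true) (h2 : pvLexLt b c = true) :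
    pvLexLt a c = true := by
  simp [pvLexLt] at h1 h2 ⊢
  rcases h1 with h1 | ⟨h1l, h1r⟩ <;> rcases h2 with h2 | ⟨h2l, h2r⟩
  · exact Or.inl (lt_trans h1 h2)
  · exact Or.inl (lt_of_lt_of_le h1 h2l)
  · exact Or.inl (lt_of_le_of_lt h1l h2)
  · exact Or.inr ⟨le_trans h1l h2l, lt_trans h1r h2r⟩

lemma pvInsertBy_pairwise (x : String × Int) (ys : List (String × Int))
    (h : ys.Pairwise (fun a b => pvLexLt b a = false)) :
    (PySem.List.insertBy pvLexLt x ys).Pairwise (fun a b => pvLexLt b a = false) := by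
  induction ys with
  | nil => simp [PySem.List.insertBy]
  | cons y ys ih =>
      have hcons : PySem.List.insertBy pvLexLt x (y :: ys)
          = if pvLexLt x y then x :: y :: ys else y :: PySem.List.insertBy pvLexLt x ys := rfl
      rw [hcons]
      rcases List.pairwise_cons.mp h with ⟨hy, hys⟩
      by_cases hx : pvLexLt x y = true
      · simp only [hx, if_true]
        refine List.pairwise_cons.mpr ⟨?_, h⟩
        intro z hz
        rcases hz with _ | hz
        · exact pvLexLt_asymm hx
        · rename_i hz'
          by_contra hzx
          have hzx' : pvLexLt z x = true := by
            cases hzb : pvLexLt z x with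
            | true => rfl
            | false => exact absurd hzb hzx
          have := pvLexLt_trans hzx' hx
          have hzy := hy z (by assumption)
          simp [this] at hzy
      · simp only [hx, if_false, Bool.false_eq_true]
        refine List.pairwise_cons.mpr ⟨?_, ih hys⟩
        intro w hw
        rcases (PySem.List.mem_insertBy pvLexLt x w ys).mp hw with rfl | hw'
        · exact Bool.eq_false_iff.mpr hx
        · exact hy w hw'

lemma pvFoldl_pairwise (xs acc : List (String × Int))
    (h : acc.Pairwise (fun a b => pvLexLt b a = false)) :
    (xs.foldl (fun a x => PySem.List.insertBy pvLexLt x a) acc).Pairwise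
      (fun a b => pvLexLt b a = false) := by
  induction xs generalizing acc with
  | nil => exact h
  | cons x xs ih => exact ih _ (pvInsertBy_pairwise x acc h)

lemma pvSorted2_pairwise (xs : List (String × Int)) :
    (PySem.List.sorted2 xs Prod.fst Prod.snd).Pairwise (fun a b => pvLexLt b a = false) := by
  have : PySem.List.sorted2 xs Prod.fst Prod.snd
      = xs.foldl (fun a x => PySem.List.insertBy pvLexLt x a) [] := rfl
  rw [this]
  exact pvFoldl_pairwise xs [] (List.Pairwise.nil)

lemma pvPairwise_lt_of_lex (l : List (String × Int))
    (hne : l.Pairwise (fun a b => a.1 ≠ b.1))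
    (h : l.Pairwise (fun a b => pvLexLt b a = false)) :
    l.Pairwise (fun a b => a.1 < b.1) := by
  refine (hne.and h).imp ?_
  rintro a b ⟨hab, hlex⟩
  have h1 : ¬ (b.1 < a.1) := by
    intro hba
    have ht : pvLexLt b a = true := by simp [pvLexLt, hba]
    rw [ht] at hlex; exact absurd hlex (by simp)
  rcases lt_or_gt_of_ne hab with hlt | hgt
  · exact hlt
  · exact absurd hgt h1

lemma pvEq_of_perm_strict (l1 l2 : List (String × Int)) (h : l1.Perm l2)
    (p1 : l1.Pairwise (fun a b => a.1 < b.1)) (p2 : l2.Pairwise (fun a b => a.1 < b.1)) :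
    l1 = l2 := by
  induction l1 generalizing l2 with
  | nil => exact (List.Perm.nil_eq h).symm ▸ rfl
  | cons a t1 ih =>
      cases l2 with
      | nil => exact absurd h.symm (by simp)
      | cons b t2 =>
          have hab : a = b := by
            have ha2 : a ∈ b :: t2 := h.mem_iff.mp (List.mem_cons_self ..)
            have hb1 : b ∈ a :: t1 := h.symm.mem_iff.mp (List.mem_cons_self ..)
            rcases List.mem_cons.mp ha2 with rfl | ha2'
            · rfl
            · rcases List.mem_cons.mp hb1 with rfl | hb1'
              · rfl
              · have h1 := (List.pairwise_cons.mp p2).1 a ha2'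
                have h2 := (List.pairwise_cons.mp p1).1 b hb1'
                exact absurd h2 (asymm h1)
          subst hab
          exact congrArg (a :: ·) (ih t2 h.cons_inv (List.pairwise_cons.mp p1).2 (List.pairwise_cons.mp p2).2)


lemma pvDropWhile_gt (x : String) :
    ∀ t : List String, t.Pairwise (· ≤ ·) → (∀ y ∈ t, x ≤ y) →
      ∀ y ∈ t.dropWhile (fun y => decide (y = x)), x < y := by
  intro t
  induction t with
  | nil => intro _ _ y hy; simp at hy
  | cons a t ih =>
      intro hp hle y hy
      by_cases ha : a = x
      · rw [List.dropWhile_cons, if_pos (by simp [ha])] at hy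
        exact ih (List.pairwise_cons.mp hp).2 (fun z hz => hle z (List.mem_cons_of_mem a hz)) y hy
      · rw [List.dropWhile_cons, if_neg (by simp [ha])] at hy
        rcases List.mem_cons.mp hy with rfl | hy'
        · exact lt_of_le_of_ne (hle y (List.mem_cons_self ..)) (Ne.symm ha)
        · exact lt_of_lt_of_le
            (lt_of_le_of_ne (hle a (List.mem_cons_self ..)) (Ne.symm ha))
            ((List.pairwise_cons.mp hp).1 y hy')

lemma pvRunsAux_eq :
    ∀ (t : List String) (cur : String) (c : Int), t.Pairwise (· ≤ ·) → (∀ y ∈ t, cur ≤ y) →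
      pvRunsAux t cur c
        = (cur, c + (List.count cur t : Int)) :: pvRle (t.dropWhile (fun y => decide (y = cur))) := by
  intro t
  induction t with
  | nil => intro cur c _ _; simp [pvRunsAux, pvRle]
  | cons x t ih =>
      intro cur c hp hle
      by_cases hx : x = cur
      · subst hx
        rw [pvRunsAux, if_pos rfl,
            ih x (c + 1) (List.pairwise_cons.mp hp).2 (List.pairwise_cons.mp hp).1]
        rw [List.dropWhile_cons, if_pos (by simp)]
        have : List.count x (x :: t) = List.count x t + 1 := List.count_cons_self ..
        rw [this]
        push_cast
        ring_nf
      · rw [pvRunsAux, if_neg hx]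
        have hcur : cur ∉ t := by
          intro hc
          have h1 := (List.pairwise_cons.mp hp).1 cur hc
          have h2 := hle x (List.mem_cons_self ..)
          exact hx (le_antisymm h1 h2)
        have hcnt : List.count cur (x :: t) = 0 := by
          rw [List.count_eq_zero]
          intro hmem
          rcases List.mem_cons.mp hmem with rfl | h
          · exact hx rfl
          · exact hcur h
        rw [hcnt, List.dropWhile_cons, if_neg (by simp [hx])]
        simp [pvRle]

lemma pvRle_spec_aux :
    ∀ (n : Nat) (s : List String), s.length ≤ n → s.Pairwise (· ≤ ·) →
      (∀ k (c : Int), ((k, c) ∈ pvRle s ↔ k ∈ s ∧ c = (List.count k s : Int)))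
      ∧ (pvRle s).Pairwise (fun a b => a.1 < b.1) := by
  intro n
  induction n with
  | zero =>
      intro s hs _
      have : s = [] := List.length_eq_zero_iff.mp (Nat.le_zero.mp hs)
      subst this
      exact ⟨fun k c => by simp [pvRle], by simp [pvRle]⟩
  | succ n ih =>
      intro s hs hp
      cases s with
      | nil => exact ⟨fun k c => by simp [pvRle], by simp [pvRle]⟩
      | cons x t =>
          rcases List.pairwise_cons.mp hp with ⟨hxle, hpt⟩
          set u := t.dropWhile (fun y => decide (y = x)) with hu
          have hsub : u.Sublist t := List.dropWhile_sublist _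
          have hulen : u.length ≤ n := le_trans hsub.length_le (Nat.le_of_succ_le_succ hs)
          have hup : u.Pairwise (· ≤ ·) := hpt.sublist hsub
          have hgt : ∀ y ∈ u, x < y := pvDropWhile_gt x t hpt hxle
          rcases ih u hulen hup with ⟨ihmem, ihpw⟩
          have hrle : pvRle (x :: t) = (x, 1 + (List.count x t : Int)) :: pvRle u := by
            rw [pvRle, pvRunsAux_eq t x 1 hpt hxle]
          -- count transfer for k ≠ x
          have hsplit : t.takeWhile (fun y => decide (y = x)) ++ u = t :=
            List.takeWhile_append_dropWhile
          have hcnt : ∀ k, k ≠ x → List.count k t = List.count k u := by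
            intro k hk
            conv_lhs => rw [← hsplit]
            rw [List.count_append]
            have : List.count k (t.takeWhile (fun y => decide (y = x))) = 0 := by
              rw [List.count_eq_zero]
              intro hm
              exact hk (by simpa using List.mem_takeWhile_imp hm)
            omega
          have hmemt : ∀ k, k ≠ x → (k ∈ t ↔ k ∈ u) := by
            intro k hk
            constructor
            · intro hkt
              rw [← hsplit] at hkt
              rcases List.mem_append.mp hkt with hm | hm
              · exact absurd (by simpa using List.mem_takeWhile_imp hm) hk
              · exact hm
            · exact fun hm => hsub.mem hm
          constructor
          · intro k c
            rw [hrle]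
            by_cases hk : k = x
            · subst hk
              constructor
              · intro hm
                rcases List.mem_cons.mp hm with he | hm'
                · refine ⟨List.mem_cons_self .., ?_⟩
                  have : c = 1 + (List.count k t : Int) := (Prod.mk.injEq ..).mp he |>.2
                  rw [List.count_cons_self]
                  push_cast
                  omega
                · exact absurd (hgt k ((ihmem k c).mp hm').1) (lt_irrefl k)
              · rintro ⟨_, hc⟩
                rw [List.count_cons_self] at hc
                push_cast at hc
                exact List.mem_cons.mpr (Or.inl (Prod.ext rfl (by omega)))
            · have hcc : List.count k (x :: t) = List.count k u := by
                rw [List.count_cons_of_ne (Ne.symm hk), hcnt k hk]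
              constructor
              · intro hm
                rcases List.mem_cons.mp hm with he | hm'
                · exact absurd ((Prod.mk.injEq ..).mp he).1 hk
                · rcases (ihmem k c).mp hm' with ⟨hku, hc⟩
                  exact ⟨List.mem_cons_of_mem _ ((hmemt k hk).mpr hku), by rw [hcc]; exact hc⟩
              · rintro ⟨hks, hc⟩
                right
                rcases List.mem_cons.mp hks with rfl | hkt
                · exact absurd rfl hk
                · exact (ihmem k c).mpr ⟨(hmemt k hk).mp hkt, by rw [← hcc]; exact hc⟩
          · rw [hrle]
            refine List.pairwise_cons.mpr ⟨?_, ihpw⟩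
            rintro ⟨k, c⟩ hm
            exact hgt k ((ihmem k c).mp hm).1

theorem pvMain (events : List (List (String × String))) :
    collect_venues_py events = collect_venues_py_alt events := by
  have h1 : collect_venues_py events
      = PySem.List.sorted2 (PySem.Dict.counter (pvVenues events)).items Prod.fst Prod.snd := by
    unfold collect_venues_py
    rw [pvFoldA_eq, ← PySem.Dict.counter_eq_foldl]
  set vs := pvVenues events with hvs
  set items := (PySem.Dict.counter vs).items with hitems
  have hic : items = (PySem.Set.ofList vs).map (fun k => (k, (List.count k vs : Int))) :=
    PySem.Dict.items_counter vs
  set s := PySem.List.sorted vs (fun v => v) with hsdef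
  have hsp : s.Pairwise (· ≤ ·) := PySem.List.sorted_pairwise vs (fun v => v)
  have hsperm : s.Perm vs := PySem.List.sorted_perm vs (fun v => v) false
  obtain ⟨memL, pwL⟩ := pvRle_spec_aux s.length s le_rfl hsp
  have memL' : ∀ k (c : Int), ((k, c) ∈ pvRle s ↔ k ∈ vs ∧ c = (List.count k vs : Int)) := by
    intro k c
    rw [memL k c, hsperm.mem_iff, hsperm.count_eq]
  have memI : ∀ k (c : Int), ((k, c) ∈ items ↔ k ∈ vs ∧ c = (List.count k vs : Int)) := by
    intro k c
    rw [hic]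
    constructor
    · intro hm
      rcases List.mem_map.mp hm with ⟨j, hj, hje⟩
      obtain ⟨h1, h2⟩ := (Prod.mk.injEq ..).mp hje
      subst h1
      exact ⟨(PySem.Set.mem_ofList vs j).mp hj, h2.symm⟩
    · rintro ⟨hk, rfl⟩
      exact List.mem_map.mpr ⟨k, (PySem.Set.mem_ofList vs k).mpr hk, rfl⟩
  have ndL : (pvRle s).Nodup :=
    pwL.imp (fun {a b} h => fun he => absurd h (he ▸ lt_irrefl _))
  have ndImapfst : (items.map Prod.fst).Nodup := by
    rw [hic, List.map_map]
    have hcomp : (Prod.fst ∘ fun k => (k, (List.count k vs : Int))) = id := rfl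
    rw [hcomp, List.map_id]
    exact PySem.Set.nodup_ofList vs
  have ndI : items.Nodup := ndImapfst.of_map
  have hperm : (pvRle s).Perm items := by
    rw [List.perm_ext_iff_of_nodup ndL ndI]
    rintro ⟨k, c⟩
    rw [memL' k c, memI k c]
  set R := PySem.List.sorted2 items Prod.fst Prod.snd with hR
  have hRperm : R.Perm items := PySem.List.sorted2_perm items Prod.fst Prod.snd false
  have hRfst : (R.map Prod.fst).Nodup := (hRperm.map Prod.fst).nodup_iff.mpr ndImapfst
  have hRne : R.Pairwise (fun a b => a.1 ≠ b.1) := List.pairwise_map.mp hRfst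
  have pwR : R.Pairwise (fun a b => a.1 < b.1) :=
    pvPairwise_lt_of_lex R hRne (pvSorted2_pairwise items)
  have := pvEq_of_perm_strict R (pvRle s) (hRperm.trans hperm.symm) pwR pwL
  rw [h1, this]
  rfl

-- ===== VERDICT (by name: the statement is the Claim_ definition above) =====
theorem collect_venues_py_spec : Claim_equal_collect_venues_py := by
  intro events _
  exact pvMain events
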